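-- pv_equiv track=rewrite | github.com/TheMattBerman/landing-page-factory | skills/page-build/scripts/build-page.py | parse_faqs
-- ===== SOURCE A (Python) =====
-- def parse_faqs(text: str) -> list[dict]:
--     faqs = []
--     question = None
--     answer_lines: list[str] = []
--     for line in text.splitlines():
--         stripped = line.strip()
--         if stripped.startswith("Q: "):
--             if question:
--                 faqs.append({"question": question, "answer": " ".join(answer_lines).strip()})
--             question = stripped[3:].strip()
--             answer_lines = []
--         elif stripped.startswith("A: "):
--             answer_lines.append(stripped[3:].strip())
--         elif question and stripped:
--             answer_lines.append(stripped)
--     if question: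
--         faqs.append({"question": question, "answer": " ".join(answer_lines).strip()})
--     return faqs
-- ===== SOURCE B (Python) =====
-- def parse_faqs(text: str) -> list[dict]:
--     # pass 1: group stripped lines into blocks, each starting at a 'Q: ' marker
--     blocks = []
--     current = None
--     for line in text.splitlines():
--         s = line.strip()
--         if s.startswith("Q: "):
--             if current is not None:
--                 blocks.append(current)
--             current = [s]
--         elif current is not None:
--             current.append(s)
--     if current is not None:
--         blocks.append(current)
--     # pass 2: map each block to a FAQ dict, dropping empty questions
--     faqs = []
--     for block in blocks:
--         question = block[0][3:].strip()
--         if question: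
--             parts = []
--             for s in block[1:]:
--                 if s.startswith("A: "):
--                     parts.append(s[3:].strip())
--                 elif s:
--                     parts.append(s)
--             faqs.append({"question": question, "answer": " ".join(parts).strip()})
--     return faqs
-- ===== Notes on version B (the rewrite author's own statement) =====
-- stated objective: alternative
-- what changed: Replaces A's single-pass state machine (pending question + answer-line accumulator with a final flush) by a two-phase decomposition: first group stripped lines into blocks starting at each question marker, then map each block to a FAQ dict, dropping blocks with an empty question.
import Mathlib
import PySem

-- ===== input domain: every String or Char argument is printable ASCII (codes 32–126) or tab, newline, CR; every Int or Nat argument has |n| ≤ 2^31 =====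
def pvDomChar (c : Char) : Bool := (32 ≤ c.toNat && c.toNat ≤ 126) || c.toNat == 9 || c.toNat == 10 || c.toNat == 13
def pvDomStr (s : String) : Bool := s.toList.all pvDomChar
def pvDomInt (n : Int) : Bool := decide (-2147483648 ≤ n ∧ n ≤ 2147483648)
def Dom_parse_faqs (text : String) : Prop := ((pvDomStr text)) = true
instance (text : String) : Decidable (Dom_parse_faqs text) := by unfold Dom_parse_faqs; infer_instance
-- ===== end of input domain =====

-- B replaces A's one-pass state machine by a two-phase decomposition (group lines into
-- question-marker blocks, then map each block to a FAQ dict); same cost, different structure.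

-- ===== PORT A =====
-- `{"question": q, "answer": " ".join(als).strip()}`
def pvEntry (q : String) (als : List String) : List (String × String) :=
  [("question", q), ("answer", PySem.Str.strip (PySem.Str.join " " als))]

-- Python truthiness of the `question` variable (None or a string)
def pvTruthy (q : Option String) : Bool :=
  match q with
  | none => false
  | some s => s ≠ ""

-- A's loop over the lines, state = (faqs, question, answer_lines)
def pvAloop : List String → List (List (String × String)) → Option String → List String →
    List (List (String × String)) × Option String × List String
  | [], faqs, q, als => (faqs, q, als)
  | line :: rest, faqs, q, als =>
    let stripped := PySem.Str.strip line
    if PySem.Str.startswith stripped "Q: " then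
      pvAloop rest
        (if pvTruthy q then faqs ++ [pvEntry (q.getD "") als] else faqs)
        (some (PySem.Str.strip (PySem.Str.slice stripped (some 3) none))) []
    else if PySem.Str.startswith stripped "A: " then
      pvAloop rest faqs q (als ++ [PySem.Str.strip (PySem.Str.slice stripped (some 3) none)])
    else if pvTruthy q && stripped ≠ "" then
      pvAloop rest faqs q (als ++ [stripped])
    else
      pvAloop rest faqs q als

def parse_faqs (text : String) : List (List (String × String)) :=
  let (faqs, q, als) := pvAloop (PySem.Str.splitlines text) [] none []
  if pvTruthy q then faqs ++ [pvEntry (q.getD "") als] else faqs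

-- ===== PORT B =====
-- pass 1: group stripped lines into blocks, state = (blocks, current)
def pvBlockLoop : List String → List (List String) → Option (List String) →
    List (List String) × Option (List String)
  | [], blocks, cur => (blocks, cur)
  | line :: rest, blocks, cur =>
    let s := PySem.Str.strip line
    if PySem.Str.startswith s "Q: " then
      pvBlockLoop rest (match cur with | some c => blocks ++ [c] | none => blocks) (some [s])
    else
      match cur with
      | some c => pvBlockLoop rest blocks (some (c ++ [s]))
      | none => pvBlockLoop rest blocks none

-- pass 2, inner loop: collect the answer parts from the block's tail
def pvPartsStep (ps : List String) (s : String) : List String :=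
  if PySem.Str.startswith s "A: " then ps ++ [PySem.Str.strip (PySem.Str.slice s (some 3) none)]
  else if s ≠ "" then ps ++ [s]
  else ps

-- pass 2, outer loop: one FAQ dict per block with a non-empty question
def pvBlockStep (faqs : List (List (String × String))) (block : List String) :
    List (List (String × String)) :=
  let question := PySem.Str.strip (PySem.Str.slice block.head! (some 3) none)
  if question ≠ "" then
    faqs ++ [[("question", question),
              ("answer", PySem.Str.strip (PySem.Str.join " " (block.tail.foldl pvPartsStep [])))]]
  else faqs

def parse_faqs_alt (text : String) : List (List (String × String)) :=
  let (blocks, cur) := pvBlockLoop (PySem.Str.splitlines text) [] none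
  let blocks := match cur with | some c => blocks ++ [c] | none => blocks
  blocks.foldl pvBlockStep []

-- ===== PRECONDITION & SPEC =====
def Spec_parse_faqs (text : String) (out : List (List (String × String))) : Prop := out = parse_faqs_alt text
instance (text : String) (out : List (List (String × String))) : Decidable (Spec_parse_faqs text out) := by unfold Spec_parse_faqs; infer_instance

-- ===== CLAIM (what is proved, stated in full; the proofs are below) =====
def Claim_equal_parse_faqs : Prop := ∀ (text : String), Dom_parse_faqs text → Spec_parse_faqs text (parse_faqs text)

-- ===== LEMMAS AND PROOFS =====

-- the single-block value of pass 2 (proof-side view of pvBlockStep)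
def pvBlkF (block : List String) : List (List (String × String)) :=
  let question := PySem.Str.strip (PySem.Str.slice block.head! (some 3) none)
  if question ≠ "" then
    [[("question", question),
      ("answer", PySem.Str.strip (PySem.Str.join " " (block.tail.foldl pvPartsStep [])))]]
  else []

theorem pvBlockStep_eq (faqs : List (List (String × String))) (b : List String) :
    pvBlockStep faqs b = faqs ++ pvBlkF b := by
  unfold pvBlockStep pvBlkF
  dsimp only
  split_ifs <;> simp

theorem foldl_pvBlockStep (bs : List (List String)) (faqs : List (List (String × String))) :
    bs.foldl pvBlockStep faqs = faqs ++ bs.flatMap pvBlkF := by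
  induction bs generalizing faqs with
  | nil => simp
  | cons b bs ih => simp [List.foldl_cons, pvBlockStep_eq, ih]

theorem foldl_pvPartsStep (t : List String) (ps : List String) :
    t.foldl pvPartsStep ps = ps ++ t.foldl pvPartsStep [] := by
  induction t generalizing ps with
  | nil => simp
  | cons s t ih =>
    simp only [List.foldl_cons]
    rw [ih, ih (pvPartsStep [] s)]
    unfold pvPartsStep
    split_ifs <;> simp

-- invariant relating A's (question, answer_lines) to B's current block
def pvRel (q : Option String) (als : List String) (cur : Option (List String)) : Prop :=
  match q, cur with
  | none, none => True
  | some qs, some (h :: t) =>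
      qs = PySem.Str.strip (PySem.Str.slice h (some 3) none) ∧
      (qs ≠ "" → als = t.foldl pvPartsStep [])
  | _, _ => False

-- flushes
def pvAfin (st : List (List (String × String)) × Option String × List String) :
    List (List (String × String)) :=
  if pvTruthy st.2.1 then st.1 ++ [pvEntry (st.2.1.getD "") st.2.2] else st.1

def pvCurList (cur : Option (List String)) : List (List String) :=
  match cur with | some c => [c] | none => []

-- the flushed open state contributes exactly the block's pass-2 value
theorem pvFlush_eq (q : Option String) (als : List String) (cur : Option (List String))
    (hrel : pvRel q als cur) :
    (if pvTruthy q then [pvEntry (q.getD "") als] else []) = (pvCurList cur).flatMap pvBlkF := by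
  match q, cur with
  | none, none => simp [pvTruthy, pvCurList]
  | some qs, some (h :: t) =>
    obtain ⟨hq, hals⟩ := hrel
    simp only [pvCurList, List.flatMap_cons, List.flatMap_nil, List.append_nil]
    unfold pvBlkF pvEntry
    by_cases hqs : qs = ""
    · simp [pvTruthy, hqs, ← hq]
    · simp [pvTruthy, hqs, ← hq, hals hqs]
  | some _, none => exact absurd hrel (by simp [pvRel])
  | some _, some [] => exact absurd hrel (by simp [pvRel])
  | none, some _ => exact absurd hrel (by simp [pvRel])

-- main invariant: A's loop+flush equals pass 2 applied to B's grouped blocks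
set_option maxHeartbeats 1000000 in
theorem pvMain (lines : List String) (blocks : List (List String)) (q : Option String)
    (als : List String) (cur : Option (List String)) (hrel : pvRel q als cur) :
    pvAfin (pvAloop lines (blocks.flatMap pvBlkF) q als) =
      ((pvBlockLoop lines blocks cur).1 ++ pvCurList (pvBlockLoop lines blocks cur).2).flatMap pvBlkF := by
  induction lines generalizing blocks q als cur with
  | nil =>
    simp only [pvAloop, pvBlockLoop, pvAfin, List.flatMap_append]
    split_ifs with ht
    · rw [← pvFlush_eq q als cur hrel]; simp [ht]
    · rw [← pvFlush_eq q als cur hrel]; simp [ht]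
  | cons line rest ih =>
    simp only [pvAloop, pvBlockLoop]
    by_cases hQ : PySem.Str.startswith (PySem.Str.strip line) "Q: "
    · simp only [hQ, if_true]
      have hflush := pvFlush_eq q als cur hrel
      cases cur with
      | none =>
        simp only [pvCurList, List.flatMap_nil] at hflush
        have hblocks : (if pvTruthy q then blocks.flatMap pvBlkF ++ [pvEntry (q.getD "") als]
            else blocks.flatMap pvBlkF) = blocks.flatMap pvBlkF := by
          split_ifs with ht <;> simp_all
        rw [hblocks]
        exact ih _ _ _ _ (by constructor <;> simp)
      | some c =>
        have hblocks : (if pvTruthy q then blocks.flatMap pvBlkF ++ [pvEntry (q.getD "") als]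
            else blocks.flatMap pvBlkF) = (blocks ++ [c]).flatMap pvBlkF := by
          simp only [pvCurList] at hflush
          split_ifs with ht <;> simp_all
        rw [hblocks]
        exact ih _ _ _ _ (by constructor <;> simp)
    · simp only [hQ]
      -- in the non-'Q: ' branches, A's state and B's block evolve in lockstep
      cases q with
      | none =>
        cases cur with
        | some c => exact absurd hrel (by simp [pvRel])
        | none =>
          have hT : pvTruthy none = false := rfl
          simp only [hT, Bool.false_and, Bool.false_eq_true, if_false]
          by_cases hA : PySem.Str.startswith (PySem.Str.strip line) "A: " <;>
            simp only [hA, if_true] <;>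
            exact ih blocks none _ none trivial
      | some qs =>
        cases cur with
        | none => exact absurd hrel (by simp [pvRel])
        | some c =>
          cases c with
          | nil => exact absurd hrel (by simp [pvRel])
          | cons h t =>
            obtain ⟨hq, hals⟩ := hrel
            by_cases hA : PySem.Str.startswith (PySem.Str.strip line) "A: "
            · simp only [hA, if_true]
              refine ih blocks (some qs) _ (some (h :: (t ++ [PySem.Str.strip line]))) ⟨hq, ?_⟩
              intro hqs
              rw [List.foldl_append, foldl_pvPartsStep [PySem.Str.strip line], ← hals hqs]
              simp only [List.foldl_cons, List.foldl_nil, pvPartsStep, hA, if_true, List.nil_append]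
            · simp only [hA]
              by_cases hC : (pvTruthy (some qs) && decide (PySem.Str.strip line ≠ "")) = true
              · rw [if_pos hC]
                have hs : PySem.Str.strip line ≠ "" := by
                  simp only [Bool.and_eq_true, decide_eq_true_eq] at hC
                  exact hC.2
                refine ih blocks (some qs) _ (some (h :: (t ++ [PySem.Str.strip line]))) ⟨hq, ?_⟩
                intro hqs
                rw [List.foldl_append, foldl_pvPartsStep [PySem.Str.strip line], ← hals hqs]
                simp only [List.foldl_cons, List.foldl_nil, pvPartsStep, hA, if_false, hs,
                  if_true, List.nil_append, ne_eq, not_false_eq_true, Bool.false_eq_true]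
              · rw [if_neg hC]
                refine ih blocks (some qs) _ (some (h :: (t ++ [PySem.Str.strip line]))) ⟨hq, ?_⟩
                intro hqs
                have hs : PySem.Str.strip line = "" := by
                  by_contra hs
                  exact hC (by simp [pvTruthy, hqs, hs])
                rw [List.foldl_append, foldl_pvPartsStep [PySem.Str.strip line], ← hals hqs]
                have hsw : PySem.Str.startswith "" "A: " = false := rfl
                simp only [List.foldl_cons, List.foldl_nil, pvPartsStep, if_false, hs,
                  ne_eq, not_true_eq_false, List.append_nil, Bool.false_eq_true, hsw]

-- ===== VERDICT (by name: the statement is the Claim_ definition above) =====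
theorem parse_faqs_spec : Claim_equal_parse_faqs := by
  intro text _
  unfold Spec_parse_faqs parse_faqs parse_faqs_alt
  have h := pvMain (PySem.Str.splitlines text) [] none [] none trivial
  simp only [List.flatMap_nil] at h
  rcases hbl : pvBlockLoop (PySem.Str.splitlines text) [] none with ⟨bs, c⟩
  rcases hal : pvAloop (PySem.Str.splitlines text) [] none [] with ⟨faqs, q, als⟩
  rw [hbl, hal] at h
  simp only [pvAfin] at h
  dsimp only
  rw [foldl_pvBlockStep]
  simp only [List.nil_append]
  match c with
  | some cc => simpa [pvCurList] using h
  | none => simpa [pvCurList] using h
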